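-- pv_equiv track=rewrite | github.com/loganyu/leetcode | solutions/1062_longest_repeating_substring.py | search
-- ===== SOURCE A (Python) =====
-- def search(length, S):
--     n = len(S)
--     seen = set()
--     for s in range(n - length + 1):
--         tmp = S[s:s+length]
--         if tmp in seen:
--             return s
--         seen.add(tmp)
--
--     return -1
-- ===== SOURCE B (Python) =====
-- def search(length, S):
--     if length < 0:
--         return -1
--     n = len(S)
--     occ = {}
--     for s in range(n - length + 1):
--         occ.setdefault(S[s:s+length], []).append(s)
--     seconds = [v[1] for v in occ.values() if len(v) > 1]
--     return min(seconds) if seconds else -1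
-- ===== Notes on version B (the rewrite author's own statement) =====
-- stated objective: alternative
-- what changed: A streams the windows through a seen-set and early-returns on the first repeat; B instead groups all window start positions by substring in one dict pass and returns the minimum second occurrence over the groups, returning -1 up front for negative window lengths.
-- intended difference: For length < 0 A's slices S[s:s+length] wrap around Python's negative stop bound and A returns the index (>= 1) of the first repeated artefact window, while B returns -1 because no substring of negative length exists - the intended 'not found' answer. — e.g. on search(-1, "ab"): A returns 2, B returns -1
import Mathlib
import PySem

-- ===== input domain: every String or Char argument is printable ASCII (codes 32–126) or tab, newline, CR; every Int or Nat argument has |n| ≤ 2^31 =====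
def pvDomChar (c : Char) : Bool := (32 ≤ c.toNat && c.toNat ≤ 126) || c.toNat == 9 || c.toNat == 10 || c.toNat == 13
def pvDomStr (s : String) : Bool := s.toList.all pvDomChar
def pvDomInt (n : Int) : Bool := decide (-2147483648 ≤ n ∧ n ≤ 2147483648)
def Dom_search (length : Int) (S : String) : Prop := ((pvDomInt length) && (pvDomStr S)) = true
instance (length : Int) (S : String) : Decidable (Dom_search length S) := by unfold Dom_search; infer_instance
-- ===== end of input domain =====

-- B replaces A's streaming seen-set with one grouping pass over the window positions followed by a
-- min over each group's second occurrence (alternative decomposition, same result for length >= 0;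
-- for length < 0 -- D_search below -- B returns -1 instead of A's wraparound-slice artefact).

-- ===== PORT A =====
def searchLoopA (length : Int) (S : String) (stop : Int) (s : Int) (seen : PySem.Set String) : Int :=
  if s < stop then
    let tmp := PySem.Str.slice S (some s) (some (s + length))
    if PySem.Set.contains seen tmp then s
    else searchLoopA length S stop (s + 1) (PySem.Set.add seen tmp)
  else -1
termination_by (stop - s).toNat
decreasing_by omega

def search (length : Int) (S : String) : Int :=
  let n := PySem.Str.len S
  searchLoopA length S (n - length + 1) 0 PySem.Set.empty

-- ===== PORT B =====
def search_alt (length : Int) (S : String) : Int :=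
  if length < 0 then -1
  else
  let n := PySem.Str.len S
  let occ : PySem.Dict String (List Int) :=
    (PySem.List.pyRange 0 (n - length + 1) 1).foldl
      (fun d s => PySem.Dict.modify d (PySem.Str.slice S (some s) (some (s + length))) [] (fun v => v ++ [s]))
      PySem.Dict.empty
  let seconds :=
    (occ.values.filter (fun v => decide (1 < (v.length : Int)))).map (fun v => PySem.List.pyGetD v 1 0)
  match PySem.List.min? seconds (fun x => x) with
  | some x => x
  | none => -1

-- ===== PRECONDITION & SPEC =====
-- For length < 0 A's windows S[s:s+length] wrap around via Python's negative slice bound and A returns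
-- the index of the first repeated such artefact window (always some index >= 1); B returns -1 because no
-- substring of negative length exists, which is the intended 'not found' answer.
def D_search (length : Int) (S : String) : Prop := length < 0
instance (length : Int) (S : String) : Decidable (D_search length S) := by unfold D_search; infer_instance

def Spec_search (length : Int) (S : String) (out : Int) : Prop := ¬ D_search length S → out = search_alt length S
instance (length : Int) (S : String) (out : Int) : Decidable (Spec_search length S out) := by unfold Spec_search; infer_instance

def pvDiffWitness_search : Int × String := (-1, "ab")
def pvDiffWitnessOut_search : Int × Int := (2, -1)

-- ===== CLAIM (what is proved, stated in full; the proofs are below) =====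
def Claim_unchanged_search : Prop := ∀ (length : Int) (S : String), Dom_search length S → Spec_search length S (search length S)
def Claim_exact_search : Prop := ∀ (length : Int) (S : String), Dom_search length S → D_search length S → search length S ≠ search_alt length S
def Claim_changed_search : Prop := Dom_search (pvDiffWitness_search.1) (pvDiffWitness_search.2) ∧ D_search (pvDiffWitness_search.1) (pvDiffWitness_search.2) ∧ search (pvDiffWitness_search.1) (pvDiffWitness_search.2) = pvDiffWitnessOut_search.1 ∧ search_alt (pvDiffWitness_search.1) (pvDiffWitness_search.2) = pvDiffWitnessOut_search.2 ∧ pvDiffWitnessOut_search.1 ≠ pvDiffWitnessOut_search.2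

-- ===== LEMMAS AND PROOFS =====

-- the window starting at s, exactly the slice expression both ports use
def wnd (length : Int) (S : String) (s : Int) : String :=
  PySem.Str.slice S (some s) (some (s + length))

-- "first duplicate": scan pairs (index, window); return the first index whose window was seen
def fdup {α : Type} [BEq α] : List (Int × α) → List α → Int
  | [], _ => -1
  | (s, t) :: rest, seen => if seen.contains t then s else fdup rest (seen ++ [t])

-- B's dict built over an explicit pair list
def grp {α : Type} [BEq α] (ps : List (Int × α)) : PySem.Dict α (List Int) :=
  ps.foldl (fun d p => PySem.Dict.modify d p.2 [] (fun v => v ++ [p.1])) PySem.Dict.empty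

-- the grouped position lists, in first-occurrence order
def groupsOf {α : Type} [BEq α] (xs : List (Int × α)) : List (List Int) :=
  (PySem.List.dedup (xs.map Prod.snd)).map
    (fun t => (xs.filter (fun p => p.2 == t)).map Prod.fst)

def secondsOf {α : Type} [BEq α] (xs : List (Int × α)) : List Int :=
  ((groupsOf xs).filter (fun v => decide (1 < (v.length : Int)))).map (fun v => PySem.List.pyGetD v 1 0)

def resultOf {α : Type} [BEq α] (xs : List (Int × α)) : Int :=
  match PySem.List.min? (secondsOf xs) (fun x => x) with
  | some x => x
  | none => -1

-- ===== A-side characterisation =====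
theorem searchLoopA_eq_fdup (length : Int) (S : String) (stop : Int) :
    ∀ (k : Nat) (s : Int), (stop - s).toNat = k → ∀ (seen : List String),
      searchLoopA length S stop s (PySem.Set.ofList seen)
        = fdup ((PySem.List.pyRange s stop 1).map (fun s => (s, wnd length S s))) seen := by
  intro k
  induction k using Nat.strong_induction_on with
  | _ k ih =>
      intro s hk seen
      rw [searchLoopA]
      by_cases hs : s < stop
      · rw [if_pos hs, PySem.List.pyRange_one_cons hs, List.map_cons]
        simp only [fdup, wnd]
        by_cases h : PySem.Str.slice S (some s) (some (s + length)) ∈ seen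
        · rw [if_pos ((PySem.Set.contains_iff _ _).mpr ((PySem.Set.mem_ofList _ _).mpr h)),
              if_pos (List.contains_iff_mem.mpr h)]
        · rw [if_neg (fun hc => h ((PySem.Set.mem_ofList _ _).mp ((PySem.Set.contains_iff _ _).mp hc))),
              if_neg (fun hc => h (List.contains_iff_mem.mp hc))]
          rw [← PySem.Set.ofList_append_singleton,
              ih (stop - (s + 1)).toNat (by omega) (s + 1) rfl]
          simp only [wnd]
      · rw [if_neg hs, PySem.List.pyRange_one_eq_nil (by omega), List.map_nil]
        rfl

theorem search_eq (length : Int) (S : String) :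
    search length S
      = fdup ((PySem.List.pyRange 0 (PySem.Str.len S - length + 1) 1).map
          (fun s => (s, wnd length S s))) [] := by
  show searchLoopA length S _ 0 (PySem.Set.ofList []) = _
  rw [searchLoopA_eq_fdup length S _ _ 0 rfl]

-- ===== B-side: dict structure =====
theorem filter_eq_nil_of_not_mem_snd {α : Type} [BEq α] [LawfulBEq α]
    (xs : List (Int × α)) (t : α) (h : t ∉ xs.map Prod.snd) :
    xs.filter (fun p => p.2 == t) = [] := by
  rw [List.filter_eq_nil_iff]
  intro p hp hbeq
  exact h (List.mem_map.mpr ⟨p, hp, eq_of_beq hbeq⟩)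

theorem filter_singleton_of_nodup {α : Type} [BEq α] [LawfulBEq α] :
    ∀ (xs : List (Int × α)) (t : α), (xs.map Prod.snd).Nodup →
    t ∈ xs.map Prod.snd →
    ∃ a : Int × α, xs.filter (fun p => p.2 == t) = [a] ∧ a.2 = t := by
  intro xs
  induction xs with
  | nil => simp
  | cons p rest ih =>
      intro t hnd ht
      simp only [List.map_cons, List.nodup_cons] at hnd
      by_cases hpt : p.2 = t
      · refine ⟨p, ?_, hpt⟩
        rw [List.filter_cons_of_pos (by simp [hpt]),
            filter_eq_nil_of_not_mem_snd rest t (hpt ▸ hnd.1)]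
      · simp only [List.map_cons, List.mem_cons] at ht
        rcases ht with h1 | h2
        · exact absurd h1.symm hpt
        · rw [List.filter_cons_of_neg (by simp [hpt])]
          exact ih t hnd.2 h2

theorem filter_len_le_one_of_nodup {α : Type} [BEq α] [LawfulBEq α]
    (xs : List (Int × α)) (t : α) (hnd : (xs.map Prod.snd).Nodup) :
    (xs.filter (fun p => p.2 == t)).length ≤ 1 := by
  by_cases ht : t ∈ xs.map Prod.snd
  · obtain ⟨a, ha, _⟩ := filter_singleton_of_nodup xs t hnd ht
    simp [ha]
  · simp [filter_eq_nil_of_not_mem_snd xs t ht]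

theorem items_grp {α : Type} [BEq α] [LawfulBEq α] (xs : List (Int × α)) :
    (grp xs).items
      = (PySem.List.dedup (xs.map Prod.snd)).map
          (fun t => (t, (xs.filter (fun p => p.2 == t)).map Prod.fst)) := by
  induction xs using List.reverseRecOn with
  | nil => rfl
  | append_singleton xs p ih =>
      have hgrp : grp (xs ++ [p])
          = PySem.Dict.modify (grp xs) p.2 [] (fun v => v ++ [p.1]) := by
        simp [grp, List.foldl_append]
      have hkeys : (grp xs).keys = PySem.List.dedup (xs.map Prod.snd) := by
        rw [PySem.Dict.keys, ih, List.map_map]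
        have hid : ((fun x : α × List Int => x.1) ∘
            fun t => (t, (xs.filter (fun p => p.2 == t)).map Prod.fst)) = fun t => t := rfl
        rw [hid, List.map_id']
      have hcontains : (grp xs).contains p.2 = decide (p.2 ∈ xs.map Prod.snd) := by
        by_cases h : p.2 ∈ xs.map Prod.snd
        · simp [h, (PySem.Dict.contains_iff_mem_keys _ _).mpr
            (by rw [hkeys, PySem.List.dedup_eq_ofList]; exact (PySem.Set.mem_ofList _ _).mpr h)]
        · simp only [h, decide_false]
          rw [← Bool.not_eq_true, PySem.Dict.contains_iff_mem_keys, hkeys,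
              PySem.List.dedup_eq_ofList, PySem.Set.mem_ofList]
          exact h
      have hval : ∀ t, t ∈ PySem.List.dedup (xs.map Prod.snd) →
          (grp xs).getD t [] = (xs.filter (fun q => q.2 == t)).map Prod.fst := by
        intro t ht
        have hmem : (t, (xs.filter (fun q => q.2 == t)).map Prod.fst) ∈ (grp xs).items := by
          rw [ih]; exact List.mem_map_of_mem ht
        have hnd : (grp xs).keys.Nodup := by
          rw [hkeys, PySem.List.dedup_eq_ofList]; exact PySem.Set.nodup_ofList _
        rw [PySem.Dict.getD_eq_get?_getD, PySem.Dict.get?_of_mem_items _ hmem hnd]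
        rfl
      have hfp : ∀ t : α, t ≠ p.2 → [p].filter (fun q => q.2 == t) = [] := by
        intro t het
        simp only [List.filter_cons, List.filter_nil]
        have : (p.2 == t) = false := beq_eq_false_iff_ne.mpr (Ne.symm het)
        simp [this]
      rw [hgrp, PySem.Dict.modify]
      by_cases h : p.2 ∈ xs.map Prod.snd
      · have hc : (grp xs).contains p.2 = true := by rw [hcontains]; simp [h]
        rw [PySem.Dict.items_insert_of_contains _ _ hc, ih]
        have hded : PySem.List.dedup ((xs ++ [p]).map Prod.snd)
            = PySem.List.dedup (xs.map Prod.snd) := by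
          simp only [List.map_append, List.map_cons, List.map_nil,
            PySem.List.dedup_eq_ofList, PySem.Set.ofList_append_singleton]
          exact PySem.Set.add_of_mem ((PySem.Set.mem_ofList _ _).mpr h)
        rw [hded, List.map_map]
        apply List.map_congr_left
        intro t htmem
        by_cases het : t = p.2
        · subst het
          simp only [Function.comp_apply, beq_self_eq_true, if_pos]
          rw [hval p.2 htmem, List.filter_append]
          simp
        · have hne : (t == p.2) = false := beq_eq_false_iff_ne.mpr het
          simp only [Function.comp_apply, hne, Bool.false_eq_true, if_false]
          rw [List.filter_append, hfp t het]
          simp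
      · have hc : (grp xs).contains p.2 = false := by rw [hcontains]; simp [h]
        rw [PySem.Dict.items_insert_of_not_contains _ _ hc, ih,
            PySem.Dict.getD_of_not_contains _ _ hc]
        have hded : PySem.List.dedup ((xs ++ [p]).map Prod.snd)
            = PySem.List.dedup (xs.map Prod.snd) ++ [p.2] := by
          simp only [List.map_append, List.map_cons, List.map_nil,
            PySem.List.dedup_eq_ofList, PySem.Set.ofList_append_singleton]
          exact PySem.Set.add_of_not_mem (by rw [PySem.Set.mem_ofList]; exact h)
        rw [hded, List.map_append]
        congr 1
        · apply List.map_congr_left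
          intro t htmem
          have htx : t ∈ xs.map Prod.snd := by
            rw [PySem.List.dedup_eq_ofList, PySem.Set.mem_ofList] at htmem; exact htmem
          have het : t ≠ p.2 := fun he => h (he ▸ htx)
          rw [List.filter_append, hfp t het]
          simp
        · simp only [List.map_cons, List.map_nil]
          rw [List.filter_append, filter_eq_nil_of_not_mem_snd xs p.2 h]
          simp

theorem values_grp {α : Type} [BEq α] [LawfulBEq α] (xs : List (Int × α)) :
    (grp xs).values = groupsOf xs := by
  rw [PySem.Dict.values, items_grp, List.map_map]
  rfl

theorem search_alt_eq (length : Int) (S : String) (hnn : ¬ length < 0) :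
    search_alt length S
      = resultOf ((PySem.List.pyRange 0 (PySem.Str.len S - length + 1) 1).map
          (fun s => (s, wnd length S s))) := by
  rw [search_alt, if_neg hnn]
  have hocc : grp ((PySem.List.pyRange 0 (PySem.Str.len S - length + 1) 1).map
        (fun s => (s, wnd length S s)))
      = (PySem.List.pyRange 0 (PySem.Str.len S - length + 1) 1).foldl
          (fun d s => PySem.Dict.modify d (PySem.Str.slice S (some s) (some (s + length))) [] (fun v => v ++ [s]))
          PySem.Dict.empty := by
    unfold grp
    rw [List.foldl_map]
    rfl
  show (match PySem.List.min? (((((PySem.List.pyRange 0 (PySem.Str.len S - length + 1) 1).foldl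
          (fun d s => PySem.Dict.modify d (PySem.Str.slice S (some s) (some (s + length))) [] (fun v => v ++ [s]))
          PySem.Dict.empty)).values.filter (fun v => decide (1 < (v.length : Int)))).map
            (fun v => PySem.List.pyGetD v 1 0)) (fun x => x) with
    | some x => x
    | none => -1) = _
  rw [← hocc, values_grp]
  rfl

-- ===== the heart: min of second occurrences = first duplicate =====
theorem second_mem_suffix (l1 l2 : List Int) (h1 : l1.length ≤ 1)
    (h2 : 1 < (l1 ++ l2).length) : PySem.List.pyGetD (l1 ++ l2) 1 0 ∈ l2 := by
  rw [PySem.List.pyGetD_ofNat']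
  match l1, h1 with
  | [], _ =>
      simp only [List.nil_append]
      have hl : 1 < l2.length := by simpa using h2
      rw [List.getD_eq_getElem l2 0 hl]
      exact List.getElem_mem hl
  | [a], _ =>
      simp only [List.singleton_append, List.getD_cons_succ]
      have hl : 0 < l2.length := by simp at h2; omega
      rw [List.getD_eq_getElem l2 0 hl]
      exact List.getElem_mem hl

theorem resultOf_eq_fdup {α : Type} [BEq α] [LawfulBEq α] :
    ∀ (ps pref : List (Int × α)),
      (((pref ++ ps).map Prod.fst).Pairwise (· < ·)) →
      ((pref.map Prod.snd).Nodup) →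
      resultOf (pref ++ ps) = fdup ps (pref.map Prod.snd) := by
  intro ps
  induction ps with
  | nil =>
      intro pref _ hnd
      have hsec : secondsOf (pref ++ []) = [] := by
        rw [List.append_nil]
        unfold secondsOf
        have : (groupsOf pref).filter (fun v => decide (1 < (v.length : Int))) = [] := by
          rw [List.filter_eq_nil_iff]
          intro g hg
          unfold groupsOf at hg
          obtain ⟨t, _, rfl⟩ := List.mem_map.mp hg
          have := filter_len_le_one_of_nodup pref t hnd
          simp only [List.length_map]
          simp only [decide_eq_true_eq, not_lt]
          omega
        rw [this, List.map_nil]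
      unfold resultOf
      rw [hsec]
      rfl
  | cons p rest ih =>
      intro pref hpair hnd
      obtain ⟨s, t⟩ := p
      by_cases hmem : t ∈ pref.map Prod.snd
      · -- duplicate found here: both sides are s
        have hfd : fdup ((s, t) :: rest) (pref.map Prod.snd) = s := by
          have hc : (pref.map Prod.snd).contains t = true := List.contains_iff_mem.mpr hmem
          simp only [fdup, hc, if_true]
        rw [hfd]
        -- the full list
        set full := pref ++ (s, t) :: rest with hfull
        -- s < every later index
        have hlt : ∀ y ∈ rest.map Prod.fst, s < y := by
          have h1 : (full.map Prod.fst).Pairwise (· < ·) := hpair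
          rw [hfull, List.map_append, List.map_cons] at h1
          have h2 := (List.pairwise_append.mp h1).2.1
          exact (List.pairwise_cons.mp h2).1
        -- t is in the dedup of full's windows
        have htfull : t ∈ PySem.List.dedup (full.map Prod.snd) := by
          rw [PySem.List.dedup_eq_ofList, PySem.Set.mem_ofList, hfull, List.map_append]
          exact List.mem_append_left _ hmem
        -- the group of t
        obtain ⟨a, ha, hat⟩ := filter_singleton_of_nodup pref t hnd hmem
        have hgt : (full.filter (fun p => p.2 == t)).map Prod.fst
            = a.1 :: s :: (rest.filter (fun p => p.2 == t)).map Prod.fst := by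
          rw [hfull, List.filter_append, ha, List.filter_cons_of_pos (by simp)]
          simp
        have hsmem : s ∈ secondsOf full := by
          unfold secondsOf
          apply List.mem_map.mpr
          refine ⟨(full.filter (fun p => p.2 == t)).map Prod.fst, ?_, ?_⟩
          · apply List.mem_filter.mpr
            constructor
            · exact List.mem_map_of_mem htfull
            · rw [hgt]; simp
          · rw [hgt, PySem.List.pyGetD_ofNat']
            rfl
        have hbound : ∀ x ∈ secondsOf full, s ≤ x := by
          intro x hx
          unfold secondsOf at hx
          obtain ⟨g, hgf, rfl⟩ := List.mem_map.mp hx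
          obtain ⟨hg, hglen⟩ := List.mem_filter.mp hgf
          unfold groupsOf at hg
          obtain ⟨t', ht', rfl⟩ := List.mem_map.mp hg
          have hsplit : (full.filter (fun p => p.2 == t')).map Prod.fst
              = (pref.filter (fun p => p.2 == t')).map Prod.fst
                ++ (((s, t) :: rest).filter (fun p => p.2 == t')).map Prod.fst := by
            rw [hfull, List.filter_append, List.map_append]
          have hlen1 : ((pref.filter (fun p => p.2 == t')).map Prod.fst).length ≤ 1 := by
            rw [List.length_map]; exact filter_len_le_one_of_nodup pref t' hnd
          have hlen2 : 1 < ((full.filter (fun p => p.2 == t')).map Prod.fst).length := by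
            simp only [decide_eq_true_eq] at hglen
            exact_mod_cast hglen
          rw [hsplit] at hlen2 ⊢
          have hx2 := second_mem_suffix _ _ hlen1 hlen2
          have hsub : (((s, t) :: rest).filter (fun p => p.2 == t')).map Prod.fst
              ⊆ s :: rest.map Prod.fst := by
            intro y hy
            have : y ∈ ((s, t) :: rest).map Prod.fst :=
              (List.Sublist.map Prod.fst List.filter_sublist).subset hy
            simpa using this
          rcases List.mem_cons.mp (hsub hx2) with h | h
          · omega
          · exact le_of_lt (hlt _ h)
        -- conclude via min?
        unfold resultOf
        rcases hm : PySem.List.min? (secondsOf full) (fun x => x) with _ | m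
        · rw [PySem.List.min?_eq_none_iff] at hm
          rw [hm] at hsmem
          exact absurd hsmem (List.not_mem_nil)
        · show m = s
          have h1 : m ≤ s := PySem.List.min?_isMin hm s hsmem
          have h2 : s ≤ m := hbound m (PySem.List.min?_mem hm)
          omega
      · -- no duplicate yet: push (s,t) into the prefix
        have hfd : fdup ((s, t) :: rest) (pref.map Prod.snd)
            = fdup rest (pref.map Prod.snd ++ [t]) := by
          have hc : (pref.map Prod.snd).contains t = false := by
            rw [← Bool.not_eq_true, List.contains_iff_mem]; exact hmem
          simp only [fdup, hc, Bool.false_eq_true, if_false]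
        rw [hfd]
        have happ : pref ++ (s, t) :: rest = (pref ++ [(s, t)]) ++ rest := by
          simp
        have hnd' : ((pref ++ [(s, t)]).map Prod.snd).Nodup := by
          rw [List.map_append, List.nodup_append]
          refine ⟨hnd, List.nodup_singleton t, ?_⟩
          intro a ha b hb
          simp only [List.map_cons, List.map_nil, List.mem_singleton] at hb
          subst hb
          intro heq
          exact hmem (heq ▸ ha)
        have hpair' : (((pref ++ [(s, t)]) ++ rest).map Prod.fst).Pairwise (· < ·) := by
          rw [← happ]; exact hpair
        rw [happ, ih (pref ++ [(s, t)]) hpair' hnd']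
        rw [List.map_append]
        rfl

theorem fdup_eq_neg1 {α : Type} [BEq α] [LawfulBEq α] :
    ∀ (ps : List (Int × α)) (seen : List α), (∀ p ∈ ps, 0 ≤ p.1) →
      fdup ps seen = -1 →
      (ps.map Prod.snd).Nodup ∧ ∀ x ∈ ps.map Prod.snd, x ∉ seen := by
  intro ps
  induction ps with
  | nil => intro seen _ _; exact ⟨List.nodup_nil, by simp⟩
  | cons p rest ih =>
      obtain ⟨s, t⟩ := p
      intro seen hpos h
      simp only [fdup] at h
      by_cases hc : seen.contains t
      · rw [if_pos hc] at h
        have := hpos (s, t) (List.mem_cons_self)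
        omega
      · rw [if_neg hc] at h
        obtain ⟨hnd, hout⟩ := ih (seen ++ [t]) (fun p hp => hpos p (List.mem_cons_of_mem _ hp)) h
        constructor
        · rw [List.map_cons, List.nodup_cons]
          refine ⟨fun hmem => ?_, hnd⟩
          exact (hout t hmem) (List.mem_append_right _ (List.mem_singleton.mpr rfl))
        · intro x hx
          rw [List.map_cons, List.mem_cons] at hx
          rcases hx with rfl | hx
          · intro hxs; exact hc (List.contains_iff_mem.mpr hxs)
          · intro hxs; exact (hout x hx) (List.mem_append_left _ hxs)

theorem empty_slice_of_ge_len (S : String) (length a : Int)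
    (ha : (S.toList.length : Int) ≤ a) :
    PySem.List.slice S.toList (some a) (some (a + length)) = [] := by
  apply List.eq_nil_of_length_eq_zero
  rw [PySem.List.length_slice]
  have h0 : 0 ≤ a := le_trans (Int.natCast_nonneg _) ha
  have hca : PySem.List.clampIdx S.toList.length a = S.toList.length := by
    rw [← Int.toNat_of_nonneg h0, PySem.List.clampIdx_natCast]
    omega
  have hcb := PySem.List.clampIdx_le S.toList.length (a + length)
  omega

-- ===== VERDICT (by name: the statements are the Claim_ definitions above) =====
theorem search_spec : Claim_unchanged_search := by
  intro length S _
  unfold Spec_search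
  intro hnd
  rw [search_eq, search_alt_eq length S hnd]
  have hpair : (((([] : List (Int × String)) ++
      ((PySem.List.pyRange 0 (PySem.Str.len S - length + 1) 1).map
        (fun s => (s, wnd length S s)))).map Prod.fst).Pairwise (· < ·)) := by
    rw [List.nil_append, List.map_map]
    have hid : (Prod.fst ∘ fun s : Int => (s, wnd length S s)) = fun s => s := rfl
    rw [hid, List.map_id']
    exact PySem.List.pairwise_lt_pyRange_one 0 (PySem.Str.len S - length + 1)
  have h := resultOf_eq_fdup
    ((PySem.List.pyRange 0 (PySem.Str.len S - length + 1) 1).map (fun s => (s, wnd length S s)))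
    [] hpair List.nodup_nil
  rw [List.nil_append] at h
  rw [h]
  rfl

theorem search_changed : Claim_changed_search := by
  unfold Claim_changed_search
  refine ⟨by decide, by decide, ?_, by decide, by decide⟩
  show search (-1) "ab" = 2
  rw [search_eq]
  decide

theorem search_tight : Claim_exact_search := by
  intro length S _ hD
  unfold D_search at hD
  have hB : search_alt length S = -1 := by rw [search_alt, if_pos hD]
  rw [hB, search_eq]
  intro hA
  obtain ⟨hnd, -⟩ := fdup_eq_neg1 _ [] (by
      intro p hp
      obtain ⟨s, hs, rfl⟩ := List.mem_map.mp hp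
      exact (PySem.List.mem_pyRange_one.mp hs).1) hA
  rw [List.map_map] at hnd
  have hcomp : (Prod.snd ∘ fun s : Int => (s, wnd length S s)) = wnd length S := rfl
  rw [hcomp] at hnd
  have hn : (0 : Int) ≤ PySem.Str.len S := by
    rw [PySem.Str.len_eq]; exact Int.natCast_nonneg _
  have hlenS : PySem.Str.len S = (S.toList.length : Int) := PySem.Str.len_eq S
  have h1 : (PySem.Str.len S - length - 1) ∈ PySem.List.pyRange 0 (PySem.Str.len S - length + 1) 1 :=
    PySem.List.mem_pyRange_one.mpr ⟨by omega, by omega⟩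
  have h2 : (PySem.Str.len S - length) ∈ PySem.List.pyRange 0 (PySem.Str.len S - length + 1) 1 :=
    PySem.List.mem_pyRange_one.mpr ⟨by omega, by omega⟩
  have hww : wnd length S (PySem.Str.len S - length - 1) = wnd length S (PySem.Str.len S - length) := by
    unfold wnd PySem.Str.slice
    have e1 := empty_slice_of_ge_len S length (PySem.Str.len S - length - 1) (by omega)
    have e2 := empty_slice_of_ge_len S length (PySem.Str.len S - length) (by omega)
    show String.ofList (PySem.List.slice S.toList _ _) = String.ofList (PySem.List.slice S.toList _ _)
    rw [e1, e2]
  have := List.inj_on_of_nodup_map hnd h1 h2 hww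
  omega
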